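-- pv_equiv track=rewrite | github.com/fhalab/LevSeq | levseq/filter_orientation.py | build_kmer_set
-- ===== SOURCE A (Python) =====
-- _VALID_BASES = set("ACGT")
--
-- def build_kmer_set(seq, kmer_size):
--     """Build a set of k-mers from the parent sequence."""
--     if kmer_size <= 0:
--         return set()
--     seq = seq.upper()
--     if len(seq) < kmer_size:
--         return set()
--     kmers = set()
--     for i in range(len(seq) - kmer_size + 1):
--         kmer = seq[i:i + kmer_size]
--         if set(kmer) <= _VALID_BASES:
--             kmers.add(kmer)
--     return kmers
-- ===== SOURCE B (Python) =====
-- def _emit(run, kmer_size, kmers):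
--     """Add every k-mer of a fully-valid run to the set."""
--     for j in range(len(run) - kmer_size + 1):
--         kmers.add("".join(run[j:j + kmer_size]))
--
-- def build_kmer_set(seq, kmer_size):
--     """Build a set of k-mers: scan once, split into maximal ACGT runs, enumerate windows per run."""
--     if kmer_size <= 0:
--         return set()
--     seq = seq.upper()
--     if len(seq) < kmer_size:
--         return set()
--     kmers = set()
--     run = []
--     for ch in seq:
--         if ch in "ACGT":
--             run.append(ch)
--         else:
--             _emit(run, kmer_size, kmers)
--             run = []
--     _emit(run, kmer_size, kmers)
--     return kmers
-- ===== Notes on version B (the rewrite author's own statement) =====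
-- stated objective: faster
-- what changed: Instead of testing every length-k window by building a Python set of its characters and checking containment, B scans the sequence once, splits it into maximal runs of valid ACGT bases, and adds every length-k window of each run without any per-window validity test.
import Mathlib
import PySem

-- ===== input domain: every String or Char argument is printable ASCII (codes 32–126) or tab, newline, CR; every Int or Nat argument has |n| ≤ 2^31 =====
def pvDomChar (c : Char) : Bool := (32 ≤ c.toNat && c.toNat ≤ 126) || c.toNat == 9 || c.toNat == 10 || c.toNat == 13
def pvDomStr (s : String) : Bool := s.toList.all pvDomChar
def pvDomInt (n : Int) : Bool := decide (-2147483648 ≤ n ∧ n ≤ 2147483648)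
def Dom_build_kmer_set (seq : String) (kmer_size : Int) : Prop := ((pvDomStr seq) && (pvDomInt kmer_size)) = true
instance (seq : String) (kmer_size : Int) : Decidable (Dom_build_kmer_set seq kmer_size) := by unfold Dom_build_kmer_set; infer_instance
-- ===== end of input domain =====

-- B replaces per-window set-containment tests with a single scan that splits the
-- sequence into maximal ACGT runs and enumerates every window inside each run, removing the per-window work (objective: faster, measured).


-- ===== PORT A =====
-- c ∈ _VALID_BASES = set("ACGT")
def isValidBase (c : Char) : Bool := c == 'A' || c == 'C' || c == 'G' || c == 'T'

-- Literal port of A.  seq[i:i+k] with 0 ≤ i ≤ n-k is (s.drop i).take k — exact here since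
-- both slice bounds are in range; 'set(kmer) <= _VALID_BASES' is 'every char of kmer is a valid base'.
def build_kmer_set (seq : String) (kmer_size : Int) : List String :=
  if kmer_size ≤ 0 then []
  else
    let s := seq.toList.map Char.toUpper
    if (s.length : Int) < kmer_size then []
    else
      let k := kmer_size.toNat
      (List.range (s.length - k + 1)).foldl
        (fun acc i =>
          let kmer := (s.drop i).take k
          if kmer.all isValidBase then PySem.Set.add acc (String.ofList kmer) else acc) []

-- ===== PORT B =====
-- 'for j in range(len(run) - kmer_size + 1): kmers.add("".join(run[j:j+kmer_size]))'
-- Nat 'run.length + 1 - k' equals Python's max(0, len(run) - k + 1) for k ≥ 1 (empty range when the run is short).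
def emitRun (k : Nat) (kmers : List String) (run : List Char) : List String :=
  (List.range (run.length + 1 - k)).foldl
    (fun a j => PySem.Set.add a (String.ofList ((run.drop j).take k))) kmers

-- the 'for ch in seq' loop of B: accumulate the current maximal valid run, flush it on an invalid char
def scanRuns (k : Nat) (kmers : List String) (run : List Char) : List Char → List String
  | [] => emitRun k kmers run
  | c :: t =>
      if isValidBase c then scanRuns k kmers (run ++ [c]) t
      else scanRuns k (emitRun k kmers run) [] t

def build_kmer_set_alt (seq : String) (kmer_size : Int) : List String :=
  if kmer_size ≤ 0 then []
  else
    let s := seq.toList.map Char.toUpper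
    if (s.length : Int) < kmer_size then []
    else scanRuns kmer_size.toNat [] [] s

-- ===== PRECONDITION & SPEC =====
def Spec_build_kmer_set (seq : String) (kmer_size : Int) (out : List String) : Prop := out = build_kmer_set_alt seq kmer_size
instance (seq : String) (kmer_size : Int) (out : List String) : Decidable (Spec_build_kmer_set seq kmer_size out) := by unfold Spec_build_kmer_set; infer_instance

-- ===== CLAIM (what is proved, stated in full; the proofs are below) =====
def Claim_equal_build_kmer_set : Prop := ∀ (seq : String) (kmer_size : Int), Dom_build_kmer_set seq kmer_size → Spec_build_kmer_set seq kmer_size (build_kmer_set seq kmer_size)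

-- ===== LEMMAS AND PROOFS =====

-- the valid windows of s, in order of their start position (proof skeleton shared by both sides)
def vw (k : Nat) : List Char → List String
  | [] => []
  | a :: rest =>
      (if k ≤ rest.length + 1 ∧ ((a :: rest).take k).all isValidBase
       then [String.ofList ((a :: rest).take k)] else []) ++ vw k rest

-- all windows of s (used for a fully-valid run)
def winsV (k : Nat) : List Char → List String
  | [] => []
  | a :: rest =>
      (if k ≤ rest.length + 1 then [String.ofList ((a :: rest).take k)] else []) ++ winsV k rest

theorem vw_short {k : Nat} : ∀ s : List Char, s.length < k → vw k s = [] := by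
  intro s
  induction s with
  | nil => intro _; rfl
  | cons a rest ih =>
    intro h
    simp only [List.length_cons] at h
    have h1 : ¬ (k ≤ rest.length + 1) := by omega
    simp [vw, h1, ih (by omega)]

theorem winsV_short {k : Nat} : ∀ s : List Char, s.length < k → winsV k s = [] := by
  intro s
  induction s with
  | nil => intro _; rfl
  | cons a rest ih =>
    intro h
    simp only [List.length_cons] at h
    have h1 : ¬ (k ≤ rest.length + 1) := by omega
    simp [winsV, h1, ih (by omega)]

theorem foldA_eq_vw {k : Nat} (hk : 1 ≤ k) :
    ∀ (s : List Char) (acc : List String),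
      (List.range (s.length + 1 - k)).foldl
        (fun acc i =>
          let kmer := (s.drop i).take k
          if kmer.all isValidBase then PySem.Set.add acc (String.ofList kmer) else acc) acc
      = (vw k s).foldl PySem.Set.add acc := by
  intro s
  induction s with
  | nil =>
    intro acc
    have : 1 - k = 0 := by omega
    simp [vw, this]
  | cons a rest ih =>
    intro acc
    by_cases h : k ≤ rest.length + 1
    · have hl : (a :: rest).length + 1 - k = (rest.length + 1 - k) + 1 := by
        simp only [List.length_cons]; omega
      rw [hl, List.range_succ_eq_map]
      simp only [List.foldl_cons, List.foldl_map, List.drop_succ_cons, List.drop_zero]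
      rw [ih]
      by_cases hv : ((a :: rest).take k).all isValidBase
      · simp [vw, h, hv]
      · simp [vw, h, hv]
    · have hl : (a :: rest).length + 1 - k = 0 := by
        simp only [List.length_cons]; omega
      rw [hl]
      simp [vw, h, vw_short (k := k) rest (by omega)]

theorem emitRun_eq_winsV {k : Nat} (hk : 1 ≤ k) :
    ∀ (s : List Char) (acc : List String),
      emitRun k acc s = (winsV k s).foldl PySem.Set.add acc := by
  intro s
  induction s with
  | nil =>
    intro acc
    have : 1 - k = 0 := by omega
    simp [emitRun, winsV, this]
  | cons a rest ih =>
    intro acc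
    unfold emitRun
    by_cases h : k ≤ rest.length + 1
    · have hl : (a :: rest).length + 1 - k = (rest.length + 1 - k) + 1 := by
        simp only [List.length_cons]; omega
      rw [hl, List.range_succ_eq_map]
      simp only [List.foldl_cons, List.foldl_map, List.drop_succ_cons, List.drop_zero]
      rw [← emitRun, ih]
      simp [winsV, h]
    · have hl : (a :: rest).length + 1 - k = 0 := by
        simp only [List.length_cons]; omega
      rw [hl]
      simp [winsV, h, winsV_short (k := k) rest (by omega)]

theorem all_take {p : Char → Bool} {s : List Char} (h : s.all p) (k : Nat) :
    (s.take k).all p := by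
  simp only [List.all_eq_true] at h ⊢
  exact fun x hx => h x (List.mem_of_mem_take hx)

theorem vw_eq_winsV {k : Nat} : ∀ s : List Char, s.all isValidBase → vw k s = winsV k s := by
  intro s
  induction s with
  | nil => intro _; rfl
  | cons a rest ih =>
    intro h
    have h' : rest.all isValidBase := by
      simp only [List.all_cons, Bool.and_eq_true] at h; exact h.2
    have hv : ((a :: rest).take k).all isValidBase = true := all_take h k
    simp [vw, winsV, hv, ih h']

theorem vw_split {k : Nat} (hk : 1 ≤ k) {c : Char} (hc : isValidBase c = false) :
    ∀ (s t : List Char), s.all isValidBase →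
      vw k (s ++ c :: t) = winsV k s ++ vw k t := by
  intro s
  induction s with
  | nil =>
    intro t _
    obtain ⟨k', rfl⟩ : ∃ k', k = k' + 1 := ⟨k - 1, by omega⟩
    have hv : ((c :: t).take (k' + 1)).all isValidBase = false := by
      simp only [List.take_succ_cons, List.all_cons, hc, Bool.false_and]
    simp only [List.nil_append, vw, winsV]
    rw [if_neg]
    · simp
    · rintro ⟨-, hall⟩
      rw [hv] at hall
      exact Bool.false_ne_true hall
  | cons a s' ih =>
    intro t h
    have h' : s'.all isValidBase := by
      simp only [List.all_cons, Bool.and_eq_true] at h; exact h.2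
    by_cases hlen : k ≤ s'.length + 1
    · have htake : ((a :: s') ++ c :: t).take k = (a :: s').take k := by
        rw [List.take_append_of_le_length (by simp; omega)]
      have hv : (((a :: s') ++ c :: t).take k).all isValidBase = true := by
        rw [htake]; exact all_take h k
      have htake' : (a :: (s' ++ c :: t)).take k = (a :: s').take k := by
        simpa [List.cons_append] using htake
      have hv2 : ((a :: s').take k).all isValidBase = true := by
        rw [← htake']; simpa [List.cons_append] using hv
      simp only [List.cons_append, vw, winsV]
      rw [ih t h', htake',
        if_pos (show k ≤ (s' ++ c :: t).length + 1 ∧ ((a :: s').take k).all isValidBase = true from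
          ⟨by simp; omega, hv2⟩),
        if_pos hlen]
      simp
    · -- window starting at a reaches past the end of the run: it contains c, hence invalid
      have hv : ((a :: (s' ++ c :: t)).take k).all isValidBase = false := by
        have hcmem : c ∈ (a :: (s' ++ c :: t)).take k := by
          rw [show a :: (s' ++ c :: t) = (a :: s') ++ c :: t by simp,
              List.take_append]
          have : 1 ≤ k - (a :: s').length := by simp; omega
          apply List.mem_append_right
          obtain ⟨m, hm⟩ : ∃ m, k - (a :: s').length = m + 1 := ⟨_, (Nat.succ_pred_eq_of_pos this).symm⟩
          rw [hm, List.take_succ_cons]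
          exact List.mem_cons_self ..
        rw [List.all_eq_false]
        exact ⟨c, hcmem, by simp [hc]⟩
      simp only [List.cons_append, vw, winsV, hv]
      rw [ih t h']
      simp [hlen]

theorem scanRuns_eq {k : Nat} (hk : 1 ≤ k) :
    ∀ (s run : List Char) (acc : List String), run.all isValidBase →
      scanRuns k acc run s = (vw k (run ++ s)).foldl PySem.Set.add acc := by
  intro s
  induction s with
  | nil =>
    intro run acc hrun
    simp only [scanRuns, List.append_nil]
    rw [emitRun_eq_winsV hk, vw_eq_winsV run hrun]
  | cons c t ih =>
    intro run acc hrun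
    by_cases hc : isValidBase c
    · have : (run ++ [c]).all isValidBase := by
        simp only [List.all_append, List.all_cons, List.all_nil] at *
        simp [hrun, hc]
      simp only [scanRuns, hc, if_true]
      rw [ih (run ++ [c]) acc this]
      simp
    · have hc' : isValidBase c = false := by simpa using hc
      simp only [scanRuns, hc', Bool.false_eq_true, if_false]
      rw [ih [] (emitRun k acc run) (by simp), List.nil_append,
          emitRun_eq_winsV hk, vw_split hk hc' run t hrun, List.foldl_append]

-- ===== VERDICT (by name: the statement is the Claim_ definition above) =====
theorem build_kmer_set_spec : Claim_equal_build_kmer_set := by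
  intro seq kmer_size _
  unfold Spec_build_kmer_set build_kmer_set build_kmer_set_alt
  by_cases h0 : kmer_size ≤ 0
  · simp [h0]
  · simp only [h0, if_false]
    set s := seq.toList.map Char.toUpper with hs
    by_cases h1 : (s.length : Int) < kmer_size
    · simp [h1]
    · simp only [h1, if_false]
      have hk : 1 ≤ kmer_size.toNat := by omega
      have hkle : kmer_size.toNat ≤ s.length := by omega
      have hrange : s.length - kmer_size.toNat + 1 = s.length + 1 - kmer_size.toNat := by omega
      rw [hrange, foldA_eq_vw hk s [], scanRuns_eq hk s [] [] (by simp), List.nil_append]
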